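-- pv_equiv track=rewrite | github.com/neringamaj/NGS_Data_Analysis | 2lab.py | determine_encoding
-- ===== SOURCE A (Python) =====
-- def determine_encoding(quality_scores):
--     encoding_ranges = {
--         'Sanger Phred+33': range(33, 78),
--         'Solexa Solexa+64': range(59, 105),
--         'Illumina 1.3+ Phred+64': range(64, 105),
--         'Illumina 1.5+ Phred+64': range(67, 105),
--         'Illumina 1.8+ Phred+33': range(33, 75)
--     }
--
--     # Initialize the dictionary to hold possible encodings
--     possible_encodings = {encoding: True for encoding in encoding_ranges}
--
--     # Check each quality score line
--     for line in quality_scores: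
--         for char in line:
--             ascii_value = ord(char)
--             # Update the possible encodings based on the ASCII value
--             for encoding, ascii_range in encoding_ranges.items():
--                 if ascii_value not in ascii_range:
--                     possible_encodings[encoding] = False
--
--     # Return the encodings that still have True as their value
--     return [encoding for encoding, possible in possible_encodings.items() if possible]
-- ===== SOURCE B (Python) =====
-- def determine_encoding(quality_scores):
--     encoding_ranges = {
--         'Sanger Phred+33': range(33, 78),
--         'Solexa Solexa+64': range(59, 105),
--         'Illumina 1.3+ Phred+64': range(64, 105),
--         'Illumina 1.5+ Phred+64': range(67, 105),
--         'Illumina 1.8+ Phred+33': range(33, 75)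
--     }
--     codes = [ord(c) for line in quality_scores for c in line]
--     if not codes:
--         return list(encoding_ranges)
--     lo, hi = min(codes), max(codes)
--     return [enc for enc, r in encoding_ranges.items()
--             if r.start <= lo and hi < r.stop]
-- ===== Notes on version B (the rewrite author's own statement) =====
-- stated objective: faster
-- what changed: Instead of updating five boolean flags for every character, B computes the global min and max ASCII code in one pass and then checks each encoding's range once against those two numbers.
import Mathlib
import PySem

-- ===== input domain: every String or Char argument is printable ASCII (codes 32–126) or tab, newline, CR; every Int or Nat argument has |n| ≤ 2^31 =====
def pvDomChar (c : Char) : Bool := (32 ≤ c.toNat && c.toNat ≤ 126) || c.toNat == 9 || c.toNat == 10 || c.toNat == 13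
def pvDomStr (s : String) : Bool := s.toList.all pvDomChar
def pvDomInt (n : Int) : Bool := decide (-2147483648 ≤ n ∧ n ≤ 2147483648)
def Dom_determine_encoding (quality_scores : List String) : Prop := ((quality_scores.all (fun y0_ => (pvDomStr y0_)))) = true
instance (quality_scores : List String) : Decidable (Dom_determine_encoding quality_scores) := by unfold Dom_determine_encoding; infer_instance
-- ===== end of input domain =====

-- B replaces per-character updating of five boolean flags by a single min/max scan checked once per range.

-- the encoding_ranges dict: (name, start, stop), in insertion order
def pvRanges : List (String × Int × Int) :=
  [("Sanger Phred+33", 33, 78),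
   ("Solexa Solexa+64", 59, 105),
   ("Illumina 1.3+ Phred+64", 64, 105),
   ("Illumina 1.5+ Phred+64", 67, 105),
   ("Illumina 1.8+ Phred+33", 33, 75)]

-- ===== PORT A =====
-- one step of the inner 'for encoding, ascii_range in encoding_ranges.items()' loop
def pvUpd (a : Int) (r : String × Int × Int × Bool) : String × Int × Int × Bool :=
  (r.1, r.2.1, r.2.2.1, if a < r.2.1 ∨ r.2.2.1 ≤ a then false else r.2.2.2)

def determine_encoding (quality_scores : List String) : List String :=
  let init := pvRanges.map (fun r => (r.1, r.2.1, r.2.2, true))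
  let final := quality_scores.foldl (fun poss line =>
    line.toList.foldl (fun poss ch => poss.map (pvUpd (ch.toNat : Int))) poss) init
  (final.filter (fun r => r.2.2.2)).map (fun r => r.1)

-- ===== PORT B =====
-- codes = [ord(c) for line in quality_scores for c in line]
def pvCodes (quality_scores : List String) : List Int :=
  quality_scores.flatMap (fun line => line.toList.map (fun c => (c.toNat : Int)))

def determine_encoding_alt (quality_scores : List String) : List String :=
  match PySem.List.min? (pvCodes quality_scores) (fun x => x), PySem.List.max? (pvCodes quality_scores) (fun x => x) with
  | some lo, some hi =>
      (pvRanges.filter (fun r => decide (r.2.1 ≤ lo) && decide (hi < r.2.2))).map (fun r => r.1)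
  | _, _ => pvRanges.map (fun r => r.1)

-- ===== PRECONDITION & SPEC =====
def Spec_determine_encoding (quality_scores : List String) (out : List String) : Prop := out = determine_encoding_alt quality_scores
instance (quality_scores : List String) (out : List String) : Decidable (Spec_determine_encoding quality_scores out) := by unfold Spec_determine_encoding; infer_instance

-- ===== CLAIM (what is proved, stated in full; the proofs are below) =====
def Claim_equal_determine_encoding : Prop := ∀ (quality_scores : List String), Dom_determine_encoding quality_scores → Spec_determine_encoding quality_scores (determine_encoding quality_scores)

-- ===== LEMMAS AND PROOFS =====

-- the nested line/char loops of A are one fold over the flat code list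
lemma foldl_lines_eq (qs : List String) (init : List (String × Int × Int × Bool)) :
    qs.foldl (fun poss line =>
      line.toList.foldl (fun poss ch => poss.map (pvUpd (ch.toNat : Int))) poss) init
    = (pvCodes qs).foldl (fun poss a => poss.map (pvUpd a)) init := by
  induction qs generalizing init with
  | nil => simp [pvCodes]
  | cons q t ih =>
      simp only [List.foldl_cons, pvCodes, List.flatMap_cons, List.foldl_append, List.foldl_map]
      rw [ih]
      rfl

-- folding the per-character updates leaves each flag = (old flag && all codes in range)
lemma foldl_upd_eq (codes : List Int) (l : List (String × Int × Int × Bool)) :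
    codes.foldl (fun poss a => poss.map (pvUpd a)) l
    = l.map (fun r => (r.1, r.2.1, r.2.2.1,
        r.2.2.2 && codes.all (fun a => decide (r.2.1 ≤ a) && decide (a < r.2.2.1)))) := by
  induction codes generalizing l with
  | nil =>
      simp only [List.foldl_nil, List.all_nil, Bool.and_true]
      have h : ∀ r : String × Int × Int × Bool, ((r.1, r.2.1, r.2.2.1, r.2.2.2) : String × Int × Int × Bool) = r :=
        fun ⟨a, b, c, d⟩ => rfl
      exact ((List.map_congr_left (fun r _ => (h r).trans rfl)).trans (List.map_id l)).symm
  | cons a as ih =>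
      simp only [List.foldl_cons, ih, List.map_map, List.all_cons]
      apply List.map_congr_left
      rintro ⟨nm, lo, hi, b⟩ _
      simp only [Function.comp, pvUpd]
      by_cases h1 : a < lo ∨ hi ≤ a
      · have h2 : ¬ (lo ≤ a ∧ a < hi) := by omega
        simp [h1, decide_eq_true_eq, h2]
      · have hlo : lo ≤ a := by omega
        have hhi : a < hi := by omega
        simp [h1, hlo, hhi]

lemma determine_encoding_closed (qs : List String) :
    determine_encoding qs
    = ((pvRanges.filter (fun r =>
          (pvCodes qs).all (fun a => decide (r.2.1 ≤ a) && decide (a < r.2.2)))).map (fun r => r.1)) := by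
  show ((qs.foldl (fun poss line =>
      line.toList.foldl (fun poss ch => poss.map (pvUpd (ch.toNat : Int))) poss)
      (pvRanges.map (fun r => (r.1, r.2.1, r.2.2, true)))).filter (fun r => r.2.2.2)).map (fun r => r.1) = _
  rw [foldl_lines_eq, foldl_upd_eq]
  simp only [List.map_map, List.filter_map, List.map_map]
  congr 1

-- ===== VERDICT (by name: the statement is the Claim_ definition above) =====

theorem determine_encoding_spec : Claim_equal_determine_encoding := by
  intro qs _
  show determine_encoding qs = determine_encoding_alt qs
  rw [determine_encoding_closed]
  unfold determine_encoding_alt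
  cases hc : pvCodes qs with
  | nil =>
      have hmin : PySem.List.min? ([] : List Int) (fun x => x) = none :=
        (PySem.List.min?_eq_none_iff [] (fun x => x)).mpr rfl
      have hmax : PySem.List.max? ([] : List Int) (fun x => x) = none :=
        (PySem.List.max?_eq_none_iff [] (fun x => x)).mpr rfl
      simp [hmin, hmax, List.all_nil]
  | cons c cs =>
      obtain ⟨lo, hlo⟩ : ∃ lo, PySem.List.min? (c :: cs) (fun x => x) = some lo := by
        cases h : PySem.List.min? (c :: cs) (fun x => x) with
        | none => exact absurd ((PySem.List.min?_eq_none_iff _ _).mp h) (by simp)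
        | some v => exact ⟨v, rfl⟩
      obtain ⟨hi, hhi⟩ : ∃ hi, PySem.List.max? (c :: cs) (fun x => x) = some hi := by
        cases h : PySem.List.max? (c :: cs) (fun x => x) with
        | none => exact absurd ((PySem.List.max?_eq_none_iff _ _).mp h) (by simp)
        | some v => exact ⟨v, rfl⟩
      simp only [hlo, hhi]
      congr 1
      apply List.filter_congr
      rintro ⟨nm, a, b⟩ _
      rw [Bool.eq_iff_iff]
      simp only [List.all_eq_true, Bool.and_eq_true, decide_eq_true_eq]
      constructor
      · intro h
        have hm := h lo (PySem.List.min?_mem hlo)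
        have hM := h hi (PySem.List.max?_mem hhi)
        exact ⟨hm.1, hM.2⟩
      · rintro ⟨h1, h2⟩ x hx
        have hmin := PySem.List.min?_isMin hlo x hx
        have hmax := PySem.List.max?_isMax hhi x hx
        simp only at hmin hmax
        exact ⟨by omega, by omega⟩
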